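-- pv_equiv track=rewrite | github.com/jskim7018/leetcode_study | algorithm_study/2025/12/20251218/easy/LC_3637.py | isTrionic
-- ===== SOURCE A (Python) =====
-- from typing import List
--
-- def isTrionic(nums: List[int]) -> bool:
--     n = len(nums)
--
--     slope_changes = []
--     curr_slope = ''
--     for i in range(1, n):
--         if nums[i] > nums[i-1] and curr_slope != 'i':
--             slope_changes.append('i')
--             curr_slope = 'i'
--         elif nums[i] < nums[i-1] and curr_slope != 'd':
--             slope_changes.append('d')
--             curr_slope = 'd'
--         elif nums[i] == nums[i-1]:
--             return False
--
--         if len(slope_changes) > 3: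
--             return False
--
--     if len(slope_changes) != 3:
--         return False
--     if slope_changes[0] == 'i' and slope_changes[1] == 'd' \
--         and slope_changes[2] == 'i':
--         return True
--
--     return False
-- ===== SOURCE B (Python) =====
-- from typing import List
--
-- def isTrionic(nums: List[int]) -> bool:
--     # Three-phase pointer walk: greedily climb, then descend, then climb again,
--     # requiring each phase to move and the final climb to reach the last index.
--     n = len(nums)
--     i, moved = 0, False
--     while i + 1 < n and nums[i+1] > nums[i]:
--         i += 1
--         moved = True
--     if not moved:
--         return False
--     moved = False
--     while i + 1 < n and nums[i+1] < nums[i]: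
--         i += 1
--         moved = True
--     if not moved:
--         return False
--     moved = False
--     while i + 1 < n and nums[i+1] > nums[i]:
--         i += 1
--         moved = True
--     return moved and i == n - 1
-- ===== Notes on version B (the rewrite author's own statement) =====
-- stated objective: alternative
-- what changed: A's slope state machine that accumulates a list of slope-change tags and pattern-matches it is replaced by a three-phase greedy pointer walk (climb, descend, climb) with no auxiliary list: each phase must advance and the final climb must reach the last index.
import Mathlib
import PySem

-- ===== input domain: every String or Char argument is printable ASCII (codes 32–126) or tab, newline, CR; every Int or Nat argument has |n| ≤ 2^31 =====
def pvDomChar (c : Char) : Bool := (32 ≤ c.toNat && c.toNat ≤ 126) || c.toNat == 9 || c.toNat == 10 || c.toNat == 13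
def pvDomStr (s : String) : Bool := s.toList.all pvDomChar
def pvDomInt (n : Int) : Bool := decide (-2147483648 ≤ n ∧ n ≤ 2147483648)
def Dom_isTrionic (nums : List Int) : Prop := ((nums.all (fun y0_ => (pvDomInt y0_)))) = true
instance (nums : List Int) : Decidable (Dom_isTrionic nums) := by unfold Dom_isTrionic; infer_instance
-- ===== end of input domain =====

-- B replaces A's slope-change state machine (tag list + pattern match) by a three-phase
-- greedy pointer walk (climb, descend, climb), each phase required to move; objective: alternative.


-- ===== PORT A =====
-- Python's final check: len(slope_changes) != 3 → False, then sc[0]=='i' and sc[1]=='d'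
-- and sc[2]=='i' (indices in range since the length is exactly 3, matched structurally).
def isTrionicFin (sc : List String) : Bool :=
  if sc.length ≠ 3 then false
  else match sc with
    | [a, b, c] => a == "i" && b == "d" && c == "i"
    | _ => false

-- the loop 'for i in range(1, n)' reading nums[i-1], nums[i]: structural recursion on
-- the adjacent pairs, state = (slope_changes, curr_slope), early returns become 'false'
def isTrionicGo (prev : Int) (rest : List Int) (sc : List String) (curr : String) : Bool :=
  match rest with
  | [] => isTrionicFin sc
  | x :: xs =>
    if x > prev ∧ curr ≠ "i" then
      if (sc ++ ["i"]).length > 3 then false else isTrionicGo x xs (sc ++ ["i"]) "i"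
    else if x < prev ∧ curr ≠ "d" then
      if (sc ++ ["d"]).length > 3 then false else isTrionicGo x xs (sc ++ ["d"]) "d"
    else if x == prev then false
    else if sc.length > 3 then false else isTrionicGo x xs sc curr

def isTrionic (nums : List Int) : Bool :=
  match nums with
  | [] => isTrionicFin []          -- loop body never runs; final length check
  | p :: rest => isTrionicGo p rest [] ""

-- ===== PORT B =====
-- Source B's 'while i+1<n and nums[i+1] > nums[i]: i += 1; moved = True', ported as recursion
-- on the suffix after index i; state (nums[i], suffix, moved); exact on every list.
def climbGo (prev : Int) (xs : List Int) (moved : Bool) : Int × List Int × Bool :=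
  match xs with
  | [] => (prev, [], moved)
  | x :: rest => if x > prev then climbGo x rest true else (prev, x :: rest, moved)

-- the analogous descending while loop ('nums[i+1] < nums[i]')
def fallGo (prev : Int) (xs : List Int) (moved : Bool) : Int × List Int × Bool :=
  match xs with
  | [] => (prev, [], moved)
  | x :: rest => if x < prev then fallGo x rest true else (prev, x :: rest, moved)

-- 'i == n - 1' at the end ⇔ the remaining suffix is empty
def isTrionic_alt (nums : List Int) : Bool :=
  match nums with
  | [] => false                    -- all three loops idle, first 'moved' stays False
  | p :: rest =>
    let r1 := climbGo p rest false
    if !r1.2.2 then false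
    else
      let r2 := fallGo r1.1 r1.2.1 false
      if !r2.2.2 then false
      else
        let r3 := climbGo r2.1 r2.2.1 false
        r3.2.2 && r3.2.1.isEmpty

-- ===== PRECONDITION & SPEC =====
def Spec_isTrionic (nums : List Int) (out : Bool) : Prop := out = isTrionic_alt nums
instance (nums : List Int) (out : Bool) : Decidable (Spec_isTrionic nums out) := by unfold Spec_isTrionic; infer_instance

-- ===== CLAIM (what is proved, stated in full; the proofs are below) =====
def Claim_equal_isTrionic : Prop := ∀ (nums : List Int), Dom_isTrionic nums → Spec_isTrionic nums (isTrionic nums)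

-- ===== LEMMAS AND PROOFS =====

lemma climbGo_cons (prev x : Int) (rest : List Int) (m : Bool) :
    climbGo prev (x :: rest) m = if x > prev then climbGo x rest true else (prev, x :: rest, m) := rfl

lemma fallGo_cons (prev x : Int) (rest : List Int) (m : Bool) :
    fallGo prev (x :: rest) m = if x < prev then fallGo x rest true else (prev, x :: rest, m) := rfl

lemma climbGo_true (xs : List Int) (prev : Int) :
    climbGo prev xs true = ((climbGo prev xs true).1, (climbGo prev xs true).2.1, true) := by
  induction xs generalizing prev with
  | nil => simp [climbGo]
  | cons x rest ih =>
    by_cases h : x > prev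
    · simp only [climbGo, if_pos h]; exact ih x
    · simp [climbGo, if_neg h]

lemma climbGo_moved (xs : List Int) (prev : Int) : (climbGo prev xs true).2.2 = true := by
  conv_lhs => rw [climbGo_true]

lemma fallGo_true (xs : List Int) (prev : Int) :
    fallGo prev xs true = ((fallGo prev xs true).1, (fallGo prev xs true).2.1, true) := by
  induction xs generalizing prev with
  | nil => simp [fallGo]
  | cons x rest ih =>
    by_cases h : x < prev
    · simp only [fallGo, if_pos h]; exact ih x
    · simp [fallGo, if_neg h]

lemma fallGo_moved (xs : List Int) (prev : Int) : (fallGo prev xs true).2.2 = true := by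
  conv_lhs => rw [fallGo_true]

-- A's final pattern check fails whenever the first recorded slope is 'd'
lemma fin_head_d (t : List String) : isTrionicFin ("d" :: t) = false := by
  unfold isTrionicFin
  match t with
  | [b, c] => simp
  | [] => simp
  | [b] => simp
  | b :: c :: d :: r => rw [if_pos (by simp)]

-- dead state: once the first slope change is 'd', A can never return True
lemma go_dead (rest : List Int) (prev : Int) (t : List String) (curr : String) :
    isTrionicGo prev rest ("d" :: t) curr = false := by
  induction rest generalizing prev t curr with
  | nil => exact fin_head_d t
  | cons x xs ih =>
    rw [isTrionicGo]
    split
    · split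
      · rfl
      · exact ih x ("d" :: t ++ ["i"]).tail "i"
    · split
      · split
        · rfl
        · exact ih x ("d" :: t ++ ["d"]).tail "d"
      · split
        · rfl
        · split
          · rfl
          · exact ih x t curr
  
-- phase 3: in state (["i","d","i"], "i") A returns True iff the rest is one strict climb
lemma go_phase3 (rest : List Int) (prev : Int) :
    isTrionicGo prev rest ["i", "d", "i"] "i" = (climbGo prev rest true).2.1.isEmpty := by
  induction rest generalizing prev with
  | nil => simp [isTrionicGo, isTrionicFin, climbGo]
  | cons x xs ih =>
    rw [isTrionicGo, climbGo]
    by_cases h : x > prev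
    · rw [if_neg (by simp [h]), if_neg (by omega), if_neg (by simp; omega),
          if_neg (by simp), if_pos h]
      exact ih x
    · by_cases h2 : x < prev
      · rw [if_neg (by simp [h]), if_pos (by simp [h2]), if_pos (by simp), if_neg h]
        simp
      · rw [if_neg (by simp [h]), if_neg (by simp [h2]),
            if_pos (by simp; omega), if_neg h]
        simp

-- phase 2: in state (["i","d"], "d") A behaves as B's fall phase followed by the final climb
lemma go_phase2 (rest : List Int) (prev : Int) :
    isTrionicGo prev rest ["i", "d"] "d" =
      ((climbGo (fallGo prev rest true).1 (fallGo prev rest true).2.1 false).2.2 &&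
       (climbGo (fallGo prev rest true).1 (fallGo prev rest true).2.1 false).2.1.isEmpty) := by
  induction rest generalizing prev with
  | nil => simp [isTrionicGo, isTrionicFin, fallGo, climbGo]
  | cons x xs ih =>
    rw [isTrionicGo, fallGo]
    by_cases h : x < prev
    · have hgt : ¬ x > prev := by omega
      rw [if_neg (by simp [hgt]), if_neg (by simp), if_neg (by simp; omega),
          if_neg (by simp), if_pos h]
      rw [fallGo_true]
      exact ih x
    · by_cases h2 : x > prev
      · rw [if_pos (by simp [h2]), if_neg (by simp), if_neg h]
        simp only [List.cons_append, List.nil_append]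
        rw [go_phase3]
        conv_rhs => rw [climbGo_cons, if_pos h2]
        simp [climbGo_moved]
      · rw [if_neg (by simp [h2]), if_neg (by simp [h]),
            if_pos (by simp; omega), if_neg h]
        conv_rhs => rw [climbGo_cons, if_neg h2]
        simp

-- phase 1: in state (["i"], "i") A behaves as B's remaining climb + fall + climb pipeline
lemma go_phase1 (rest : List Int) (prev : Int) :
    isTrionicGo prev rest ["i"] "i" =
      (let r1 := climbGo prev rest true
       let r2 := fallGo r1.1 r1.2.1 false
       if !r2.2.2 then false
       else
         let r3 := climbGo r2.1 r2.2.1 false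
         r3.2.2 && r3.2.1.isEmpty) := by
  induction rest generalizing prev with
  | nil => simp [isTrionicGo, isTrionicFin, climbGo, fallGo]
  | cons x xs ih =>
    rw [isTrionicGo]
    by_cases h : x > prev
    · rw [if_neg (by simp [h]), if_neg (by omega), if_neg (by simp; omega),
          if_neg (by simp)]
      conv_rhs => rw [climbGo_cons, if_pos h]
      exact ih x
    · by_cases h2 : x < prev
      · rw [if_neg (by simp [h]), if_pos (by simp [h2]), if_neg (by simp)]
        simp only [List.cons_append, List.nil_append]
        rw [go_phase2]
        conv_rhs => rw [climbGo_cons, if_neg h]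
        simp only []
        conv_rhs => rw [fallGo_cons, if_pos h2]
        simp [fallGo_moved]
      · rw [if_neg (by simp [h]), if_neg (by simp [h2]),
            if_pos (by simp; omega)]
        conv_rhs => rw [climbGo_cons, if_neg h]
        simp only []
        conv_rhs => rw [fallGo_cons, if_neg h2]
        simp

-- ===== VERDICT (by name: the statement is the Claim_ definition above) =====
theorem isTrionic_spec : Claim_equal_isTrionic := by
  intro nums _
  unfold Spec_isTrionic
  match nums with
  | [] => rfl
  | p :: rest =>
    rw [isTrionic, isTrionic_alt]
    match rest with
    | [] => rfl
    | x :: xs =>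
      rw [isTrionicGo]
      by_cases h : x > p
      · rw [if_pos (by simp [h]), if_neg (by simp)]
        simp only [List.nil_append]
        rw [go_phase1]
        conv_rhs => rw [climbGo_cons, if_pos h]
        simp [climbGo_moved]
      · by_cases h2 : x < p
        · rw [if_neg (by simp [h]), if_pos (by simp [h2]), if_neg (by simp)]
          simp only [List.nil_append]
          rw [go_dead]
          conv_rhs => rw [climbGo_cons, if_neg h]
          simp
        · rw [if_neg (by simp [h]), if_neg (by simp [h2]),
              if_pos (by simp; omega)]
          conv_rhs => rw [climbGo_cons, if_neg h]
          simp
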